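-- pv_equiv track=rewrite | github.com/aiventures/utils | src/util/emoji_util.py | get_emoji_tree
-- ===== SOURCE A (Python) =====
-- def get_emoji_tree(emoji_dict: dict) -> dict:
--     """returns the emoji taxonomy"""
--     main_classes = {}
--     for emoji_key, emoji_info in emoji_dict.items():
--         _emoji_class = emoji_info["class"]
--         _emoji_subclass = emoji_info["subclass"]
--         _main_class_dict = main_classes.get(_emoji_class, {})
--         # add the main class
--         if len(_main_class_dict) == 0:
--             main_classes[_emoji_class] = _main_class_dict
--         _subclass_dict = _main_class_dict.get(_emoji_subclass, {})
--         if len(_subclass_dict) == 0: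
--             _main_class_dict[_emoji_subclass] = _subclass_dict
--         _subclass_dict[emoji_key] = emoji_info
--     return main_classes
-- ===== SOURCE B (Python) =====
-- def get_emoji_tree(emoji_dict: dict) -> dict:
--     """returns the emoji taxonomy"""
--     items = list(emoji_dict.items())
--     classes = list(dict.fromkeys(info["class"] for _, info in items))
--     tree = {}
--     for c in classes:
--         in_c = [(k, info) for k, info in items if info["class"] == c]
--         subs = list(dict.fromkeys(info["subclass"] for _, info in in_c))
--         tree[c] = {s: {k: info for k, info in in_c if info["subclass"] == s}
--                    for s in subs}
--     return tree
-- ===== Notes on version B (the rewrite author's own statement) =====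
-- stated objective: alternative
-- what changed: B groups by filtering: it first computes the ordered distinct class list with dict.fromkeys, then for each class filters its items and builds the subclass dicts the same way, instead of A's single pass that incrementally mutates nested dicts through aliases.
import Mathlib
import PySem

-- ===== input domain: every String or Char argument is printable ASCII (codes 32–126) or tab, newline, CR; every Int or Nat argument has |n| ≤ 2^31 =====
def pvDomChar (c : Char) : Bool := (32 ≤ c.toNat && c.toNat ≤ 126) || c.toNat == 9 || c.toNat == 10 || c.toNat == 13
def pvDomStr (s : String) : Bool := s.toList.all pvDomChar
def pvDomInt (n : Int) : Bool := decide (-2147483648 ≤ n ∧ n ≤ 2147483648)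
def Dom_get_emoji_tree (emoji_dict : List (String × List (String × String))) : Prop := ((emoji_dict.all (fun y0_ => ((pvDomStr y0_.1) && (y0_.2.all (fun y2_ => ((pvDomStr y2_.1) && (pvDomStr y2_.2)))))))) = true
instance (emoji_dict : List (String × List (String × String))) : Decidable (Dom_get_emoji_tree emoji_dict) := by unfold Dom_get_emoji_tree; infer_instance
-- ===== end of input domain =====

-- B builds the taxonomy by filtering per class/subclass (dict.fromkeys + comprehensions) instead of A's
-- single pass mutating nested dicts through aliases; same return value, no speed claim.
-- Python A mutates nothing observable; both ports are value-level and agree on the RETURN value.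

-- ===== PORT A =====
-- emoji_info["class"] / ["subclass"]: dict lookup (KeyError excluded by Pre_, where this default is never read)
def pvLookup (info : List (String × String)) (k : String) : String :=
  ((PySem.Dict.mk info).get? k).getD ""

-- the loop body of A; Python mutates _subclass_dict/_main_class_dict in place through aliases held by the
-- outer dicts, so the value-level transliteration re-inserts the updated inner dicts at the same keys
-- (PySem.Dict.insert overwrites in place, keeping position, exactly like Python).
def pvStepA (main_classes : PySem.Dict String (PySem.Dict String (PySem.Dict String (List (String × String)))))
    (kv : String × List (String × String)) :
    PySem.Dict String (PySem.Dict String (PySem.Dict String (List (String × String)))) :=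
  let _emoji_class := pvLookup kv.2 "class"
  let _emoji_subclass := pvLookup kv.2 "subclass"
  let _main_class_dict := main_classes.getD _emoji_class PySem.Dict.empty
  let main_classes := if _main_class_dict.size = 0 then main_classes.insert _emoji_class _main_class_dict else main_classes
  let _subclass_dict := _main_class_dict.getD _emoji_subclass PySem.Dict.empty
  let _main_class_dict := if _subclass_dict.size = 0 then _main_class_dict.insert _emoji_subclass _subclass_dict else _main_class_dict
  let _subclass_dict := _subclass_dict.insert kv.1 kv.2
  let _main_class_dict := _main_class_dict.insert _emoji_subclass _subclass_dict
  main_classes.insert _emoji_class _main_class_dict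

def get_emoji_tree (emoji_dict : List (String × List (String × String))) : List (String × List (String × List (String × List (String × String)))) :=
  let main_classes := emoji_dict.foldl pvStepA PySem.Dict.empty
  main_classes.items.map (fun p => (p.1, p.2.items.map (fun q => (q.1, q.2.items))))

-- ===== PORT B =====
def get_emoji_tree_alt (emoji_dict : List (String × List (String × String))) : List (String × List (String × List (String × List (String × String)))) :=
  let items := emoji_dict
  let classes := PySem.List.dedup (items.map (fun kv => pvLookup kv.2 "class"))
  classes.map (fun c =>
    let in_c := items.filter (fun kv => pvLookup kv.2 "class" == c)
    let subs := PySem.List.dedup (in_c.map (fun kv => pvLookup kv.2 "subclass"))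
    (c, subs.map (fun s => (s, in_c.filter (fun kv => pvLookup kv.2 "subclass" == s)))))

-- ===== PRECONDITION & SPEC =====
-- Pre_: the outer list stands for a Python dict, so its keys are unique (every real call satisfies this);
-- every emoji_info must contain the keys "class" and "subclass", since Python A raises KeyError otherwise.
def Pre_get_emoji_tree (emoji_dict : List (String × List (String × String))) : Prop :=
  (emoji_dict.map (·.1)).Nodup ∧
    ∀ kv ∈ emoji_dict, "class" ∈ kv.2.map (·.1) ∧ "subclass" ∈ kv.2.map (·.1)
instance (emoji_dict : List (String × List (String × String))) : Decidable (Pre_get_emoji_tree emoji_dict) := by unfold Pre_get_emoji_tree; infer_instance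

def pvWitness_get_emoji_tree : (List (String × List (String × String))) :=
  [(":smile:", [("class", "face"), ("subclass", "happy")]),
   (":cat:", [("class", "animal"), ("subclass", "mammal")]),
   (":grin:", [("class", "face"), ("subclass", "happy")])]

def Spec_get_emoji_tree (emoji_dict : List (String × List (String × String))) (out : List (String × List (String × List (String × List (String × String))))) : Prop := out = get_emoji_tree_alt emoji_dict
instance (emoji_dict : List (String × List (String × String))) (out : List (String × List (String × List (String × List (String × String))))) : Decidable (Spec_get_emoji_tree emoji_dict out) := by
  unfold Spec_get_emoji_tree
  haveI d1 : DecidableEq (List (String × List (String × String))) := inferInstance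
  haveI d2 : DecidableEq (List (String × List (String × List (String × String)))) := inferInstance
  infer_instance

-- ===== CLAIM (what is proved, stated in full; the proofs are below) =====
def Claim_equal_get_emoji_tree : Prop := ∀ (emoji_dict : List (String × List (String × String))), Dom_get_emoji_tree emoji_dict → Pre_get_emoji_tree emoji_dict → Spec_get_emoji_tree emoji_dict (get_emoji_tree emoji_dict)

-- ===== LEMMAS AND PROOFS =====

def pvCls (kv : String × List (String × String)) : String := pvLookup kv.2 "class"
def pvSub (kv : String × List (String × String)) : String := pvLookup kv.2 "subclass"

-- the per-item effect of A's loop at the innermost / middle level, in clean "read-modify-write" form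
def pvStep3 (d : PySem.Dict String (List (String × String))) (kv : String × List (String × String)) :
    PySem.Dict String (List (String × String)) :=
  d.insert kv.1 kv.2

def pvStep2 (d : PySem.Dict String (PySem.Dict String (List (String × String))))
    (kv : String × List (String × String)) :
    PySem.Dict String (PySem.Dict String (List (String × String))) :=
  d.insert (pvSub kv) (pvStep3 (d.getD (pvSub kv) PySem.Dict.empty) kv)

-- (if P then d.insert k v else d).insert k w = d.insert k w : A's "register the fresh dict" write is
-- absorbed by the final overwrite at the same key
lemma pv_insert_absorb {ν : Type} (d : PySem.Dict String ν) (k : String) (v w : ν)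
    (P : Prop) [Decidable P] :
    (if P then d.insert k v else d).insert k w = d.insert k w := by
  split_ifs with h
  · exact PySem.Dict.insert_insert_self d k v w
  · rfl

-- A's loop body equals the clean nested read-modify-write step
lemma pvStepA_eq (d : PySem.Dict String (PySem.Dict String (PySem.Dict String (List (String × String)))))
    (kv : String × List (String × String)) :
    pvStepA d kv = d.insert (pvCls kv) (pvStep2 (d.getD (pvCls kv) PySem.Dict.empty) kv) := by
  simp only [pvStepA, pvStep2, pvStep3, pvCls, pvSub, pv_insert_absorb]

-- grouping invariant: a fold that inserts each item at (key x), updating the bucket read back at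
-- (key x), has at c exactly the fold of the bucket updates over the items whose key is c
lemma pv_foldl_insert_group {α ν : Type} (key : α → String) (f : ν → α → ν) (v0 : ν) (c : String) :
    ∀ (l : List α) (d : PySem.Dict String ν),
      (l.foldl (fun d x => d.insert (key x) (f (d.getD (key x) v0) x)) d).getD c v0 =
      (l.filter (fun x => key x == c)).foldl f (d.getD c v0) := by
  intro l
  induction l with
  | nil => intro d; rfl
  | cons x t ih =>
    intro d
    simp only [List.foldl_cons, List.filter_cons]
    by_cases h : key x = c
    · simp [h, ih]
    · simp [h, Ne.symm h, ih, PySem.Dict.getD_insert]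

-- one class's bucket: converting the inner fold's dict equals B's filter-and-dedup construction
lemma pv_inner (m : List (String × List (String × String))) (hnd : (m.map (fun kv => kv.1)).Nodup) :
    (m.foldl pvStep2 PySem.Dict.empty).items.map (fun q => (q.1, q.2.items)) =
    (PySem.List.dedup (m.map pvSub)).map
      (fun s => (s, m.filter (fun kv => pvSub kv == s))) := by
  have hnd2 : (m.foldl pvStep2 PySem.Dict.empty).keys.Nodup := by
    have := PySem.Dict.nodup_keys_foldl_insert_key m pvSub
      (fun d kv => pvStep3 (d.getD (pvSub kv) PySem.Dict.empty) kv) PySem.Dict.empty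
    simpa [PySem.Dict.keys_empty] using this
  have hkeys : (m.foldl pvStep2 PySem.Dict.empty).keys = PySem.Set.ofList (m.map pvSub) := by
    have := PySem.Dict.keys_foldl_insert_key m pvSub
      (fun d kv => pvStep3 (d.getD (pvSub kv) PySem.Dict.empty) kv) PySem.Dict.empty
    simpa [PySem.Dict.keys_empty, PySem.Set.update_nil_left] using this
  rw [PySem.Dict.items_eq_map_keys _ hnd2 PySem.Dict.empty, hkeys, List.map_map,
    PySem.List.dedup_eq_ofList]
  refine List.map_congr_left (fun s _ => ?_)
  have hgrp : (m.foldl pvStep2 PySem.Dict.empty).getD s PySem.Dict.empty =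
      (m.filter (fun kv => pvSub kv == s)).foldl pvStep3 PySem.Dict.empty := by
    have := pv_foldl_insert_group pvSub pvStep3 PySem.Dict.empty s m PySem.Dict.empty
    simpa [PySem.Dict.getD_empty] using this
  have hfr : ((m.filter (fun kv => pvSub kv == s)).foldl pvStep3 PySem.Dict.empty).items =
      m.filter (fun kv => pvSub kv == s) := by
    have hsub : ((m.filter (fun kv => pvSub kv == s)).map (fun kv => kv.1)).Nodup :=
      hnd.sublist (List.filter_sublist.map _)
    have := PySem.Dict.items_foldl_insert_fresh (m.filter (fun kv => pvSub kv == s))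
      (fun kv => kv.1) (fun kv => kv.2) PySem.Dict.empty
      (fun a _ => PySem.Dict.contains_empty _) hsub
    simpa using this
  simp only [Function.comp, hgrp, hfr]

-- ===== VERDICT (by name: the statement is the Claim_ definition above) =====
theorem get_emoji_tree_spec : Claim_equal_get_emoji_tree := by
  intro l _hdom hpre
  unfold Spec_get_emoji_tree get_emoji_tree get_emoji_tree_alt
  dsimp only
  have hstep : pvStepA = fun d kv => d.insert (pvCls kv) (pvStep2 (d.getD (pvCls kv) PySem.Dict.empty) kv) :=
    funext fun d => funext fun kv => pvStepA_eq d kv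
  rw [hstep]
  have hnd1 : (l.foldl (fun d kv => d.insert (pvCls kv) (pvStep2 (d.getD (pvCls kv) PySem.Dict.empty) kv)) PySem.Dict.empty).keys.Nodup := by
    have := PySem.Dict.nodup_keys_foldl_insert_key l pvCls
      (fun d kv => pvStep2 (d.getD (pvCls kv) PySem.Dict.empty) kv) PySem.Dict.empty
    simpa [PySem.Dict.keys_empty] using this
  have hkeys : (l.foldl (fun d kv => d.insert (pvCls kv) (pvStep2 (d.getD (pvCls kv) PySem.Dict.empty) kv)) PySem.Dict.empty).keys = PySem.Set.ofList (l.map pvCls) := by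
    have := PySem.Dict.keys_foldl_insert_key l pvCls
      (fun d kv => pvStep2 (d.getD (pvCls kv) PySem.Dict.empty) kv) PySem.Dict.empty
    simpa [PySem.Dict.keys_empty, PySem.Set.update_nil_left] using this
  rw [PySem.Dict.items_eq_map_keys _ hnd1 PySem.Dict.empty, hkeys, List.map_map,
    show (fun kv => pvLookup kv.2 "class") = pvCls from rfl,
    show (fun kv => pvLookup kv.2 "subclass") = pvSub from rfl,
    PySem.List.dedup_eq_ofList]
  refine List.map_congr_left (fun c _ => ?_)
  have hgrp : (l.foldl (fun d kv => d.insert (pvCls kv) (pvStep2 (d.getD (pvCls kv) PySem.Dict.empty) kv)) PySem.Dict.empty).getD c PySem.Dict.empty =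
      (l.filter (fun kv => pvCls kv == c)).foldl pvStep2 PySem.Dict.empty := by
    have := pv_foldl_insert_group pvCls pvStep2 PySem.Dict.empty c l PySem.Dict.empty
    simpa [PySem.Dict.getD_empty] using this
  have hnd' : ((l.filter (fun kv => pvCls kv == c)).map (fun kv => kv.1)).Nodup :=
    hpre.1.sublist (List.filter_sublist.map _)
  simp only [Function.comp, hgrp, pv_inner _ hnd']
  rfl
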